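-- pv_equiv track=rewrite | github.com/IFoA-GenAI-WP/work | app.py | parse_gpt4_response
-- ===== SOURCE A (Python) =====
-- def parse_gpt4_response(gpt4_response):
--     lines = gpt4_response.split('\n')
--     pre_table_text = []
--     table_data = []
--     post_table_text = []
--     start_table = False
--     end_table = False
--
--     for line in lines:
--         if not start_table and '|' not in line:
--             pre_table_text.append(line)
--         elif '|' in line:
--             start_table = True
--             table_data.append([col.strip() for col in line.split('|')[1:-1]])
--         elif start_table and '|' not in line:
--             end_table = True
--             post_table_text.append(line)
--
--     return "\n".join(pre_table_text).strip(), table_data, "\n".join(post_table_text).strip()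
-- ===== SOURCE B (Python) =====
-- def parse_gpt4_response(gpt4_response):
--     lines = gpt4_response.split('\n')
--     idx = next((i for i, l in enumerate(lines) if '|' in l), len(lines))
--     pre = lines[:idx]
--     rest = lines[idx:]
--     table_data = [[col.strip() for col in l.split('|')[1:-1]] for l in rest if '|' in l]
--     post = [l for l in rest if '|' not in l]
--     return "\n".join(pre).strip(), table_data, "\n".join(post).strip()
-- ===== Notes on version B (the rewrite author's own statement) =====
-- stated objective: simpler
-- what changed: Replaces A's stateful start_table/end_table flag loop with a boundary decomposition: find the first '|' line index once, take the prefix as pre-table text, and partition only the tail by '|' into table rows and post-table text.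
import Mathlib
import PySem

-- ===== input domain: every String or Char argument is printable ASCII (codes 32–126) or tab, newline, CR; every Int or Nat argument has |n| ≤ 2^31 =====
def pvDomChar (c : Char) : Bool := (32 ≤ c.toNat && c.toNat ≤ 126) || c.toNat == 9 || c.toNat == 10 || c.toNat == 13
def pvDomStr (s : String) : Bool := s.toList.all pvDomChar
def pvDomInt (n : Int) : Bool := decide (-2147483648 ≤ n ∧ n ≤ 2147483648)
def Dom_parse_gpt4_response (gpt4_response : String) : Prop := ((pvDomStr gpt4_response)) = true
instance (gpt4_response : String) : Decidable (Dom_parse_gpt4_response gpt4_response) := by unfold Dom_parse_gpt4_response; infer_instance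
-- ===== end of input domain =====

-- B (simpler): finds the table-start index once, then partitions only the tail by '|',
-- replacing A's stateful start_table/end_table flag loop; same return value everywhere.

-- ===== PORT A =====
-- [col.strip() for col in line.split('|')[1:-1]]  (shared row parse, identical in both Pythons);
-- split? is always `some` here since the separators "|" and "\n" are nonempty
def pvParseRow (line : String) : List String :=
  (PySem.List.slice ((PySem.Str.split? line "|").getD []) (some 1) (some (-1))).map PySem.Str.strip

-- the body of A's for-loop (state: pre_table_text, table_data, post_table_text, start_table;
-- A's end_table flag is never read, so it is not carried)
def pvStepA (acc : List String × List (List String) × List String × Bool) (line : String) :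
    List String × List (List String) × List String × Bool :=
  match acc with
  | (pre, tab, post, start) =>
    if !start && !(PySem.Str.isIn "|" line) then (pre ++ [line], tab, post, start)
    else if PySem.Str.isIn "|" line then (pre, tab ++ [pvParseRow line], post, true)
    else if start && !(PySem.Str.isIn "|" line) then (pre, tab, post ++ [line], start)
    else acc

def parse_gpt4_response (gpt4_response : String) : String × List (List String) × String :=
  let lines := (PySem.Str.split? gpt4_response "\n").getD []
  let st := lines.foldl pvStepA ([], [], [], false)
  (PySem.Str.strip (PySem.Str.join "\n" st.1), st.2.1,
   PySem.Str.strip (PySem.Str.join "\n" st.2.2.1))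

-- ===== PORT B =====
def parse_gpt4_response_alt (gpt4_response : String) : String × List (List String) × String :=
  let lines := (PySem.Str.split? gpt4_response "\n").getD []
  let idx := lines.findIdx (fun l => PySem.Str.isIn "|" l)
  let pre := lines.take idx
  let rest := lines.drop idx
  let tableData := (rest.filter (fun l => PySem.Str.isIn "|" l)).map pvParseRow
  let post := rest.filter (fun l => !(PySem.Str.isIn "|" l))
  (PySem.Str.strip (PySem.Str.join "\n" pre), tableData,
   PySem.Str.strip (PySem.Str.join "\n" post))

-- ===== PRECONDITION & SPEC =====
def Spec_parse_gpt4_response (gpt4_response : String) (out : String × List (List String) × String) : Prop := out = parse_gpt4_response_alt gpt4_response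
instance (gpt4_response : String) (out : String × List (List String) × String) : Decidable (Spec_parse_gpt4_response gpt4_response out) := by unfold Spec_parse_gpt4_response; infer_instance

-- ===== CLAIM (what is proved, stated in full; the proofs are below) =====
def Claim_equal_parse_gpt4_response : Prop := ∀ (gpt4_response : String), Dom_parse_gpt4_response gpt4_response → Spec_parse_gpt4_response gpt4_response (parse_gpt4_response gpt4_response)

-- ===== LEMMAS AND PROOFS =====

-- once start_table is set, '|' lines go to the table and the rest to post_table_text
theorem pvFoldA_true (ls : List String) (pre : List String) (tab : List (List String))
    (post : List String) :
    ls.foldl pvStepA (pre, tab, post, true) =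
      (pre, tab ++ (ls.filter (fun l => PySem.Str.isIn "|" l)).map pvParseRow,
       post ++ ls.filter (fun l => !(PySem.Str.isIn "|" l)), true) := by
  induction ls generalizing tab post with
  | nil => simp
  | cons l ls ih =>
    by_cases h : PySem.Chars.isIn ['|'] l.toList = true <;>
      simp [pvStepA, h, ih]

-- A's whole loop computes exactly B's take/drop/filter decomposition
theorem pvFoldA_false (ls : List String) (pre : List String) :
    ls.foldl pvStepA (pre, [], [], false) =
      (pre ++ ls.take (ls.findIdx (fun l => PySem.Str.isIn "|" l)),
       ((ls.drop (ls.findIdx (fun l => PySem.Str.isIn "|" l))).filter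
          (fun l => PySem.Str.isIn "|" l)).map pvParseRow,
       (ls.drop (ls.findIdx (fun l => PySem.Str.isIn "|" l))).filter
          (fun l => !(PySem.Str.isIn "|" l)),
       ls.any (fun l => PySem.Str.isIn "|" l)) := by
  induction ls generalizing pre with
  | nil => simp
  | cons l ls ih =>
    by_cases h : PySem.Chars.isIn ['|'] l.toList = true
    · simp [pvStepA, h, pvFoldA_true, List.findIdx_cons]
    · simp [pvStepA, h, ih, List.findIdx_cons]

-- ===== VERDICT (by name: the statement is the Claim_ definition above) =====
theorem parse_gpt4_response_spec : Claim_equal_parse_gpt4_response := by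
  intro s _
  unfold Spec_parse_gpt4_response parse_gpt4_response parse_gpt4_response_alt
  simp [pvFoldA_false]
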